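-- pv_equiv track=rewrite | github.com/ccaroon/advent-of-code | 2024/day04/utils.py | find_by_dir
-- ===== SOURCE A (Python) =====
-- def find_by_dir(grid:list[list], row:int, col:int, word:str, direction:tuple) -> bool:
--     """
--     Look for `word` in `grid` starting at `row`,`col` and looking in the
--     compass `direction`.
--
--     Returns:
--         bool: Was `word` found?
--
--     >>> find_by_dir([['.','.','X','M','A','S','.','.']], 0, 2, "XMAS", EAST)
--     True
--
--     >>> find_by_dir([['.','.','X','M','A','S','.','.']], 0, 4, "XMAS", WEST)
--     False
--
--     >>> find_by_dir([
--     ... [' ',' ',' ',' ',' ',' '],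
--     ... [' ','X',' ',' ',' ',' '],
--     ... [' ',' ','M',' ',' ',' '],
--     ... [' ',' ',' ','A',' ',' '],
--     ... [' ',' ',' ',' ','S',' ']
--     ... ],
--     ... 1, 1, "XMAS", SE)
--     True
--     """
--     found = True
--     num_rows = len(grid)
--     num_cols = len(grid[0])
--
--     curr_row = row
--     curr_col = col
--     for letter in word:
--         # Still looking, but next row|col index is out of bounds
--         # i.e. no more letters in that direction ... can't be found
--         if  (
--                 curr_row < 0 or curr_row >= num_rows
--                 or
--                 curr_col < 0 or curr_col >= num_cols
--             ):
--             found = False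
--             break
--
--         if letter == grid[curr_row][curr_col]:
--             curr_row += direction[0]
--             curr_col += direction[1]
--         else:
--             found = False
--             break
--
--     return found
-- ===== SOURCE B (Python) =====
-- def find_by_dir(grid, row, col, word, direction):
--     num_rows = len(grid)
--     num_cols = len(grid[0])
--     dr, dc = direction
--     cells = []
--     for i in range(len(word)):
--         r = row + i * dr
--         c = col + i * dc
--         if not (0 <= r < num_rows and 0 <= c < num_cols):
--             break
--         cells.append(grid[r][c])
--     return cells == list(word)
-- ===== Notes on version B (the rewrite author's own statement) =====
-- stated objective: alternative
-- what changed: B computes each cell coordinate arithmetically (r=row+i*dr, c=col+i*dc) while gathering the in-bounds cells along the ray into a list, then compares that list to list(word) once, instead of A's single inline scan maintaining curr_row/curr_col accumulators with a found flag and early mismatch break.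
-- outside the precondition, e.g. on find_by_dir([['a', 'b'], ['c']], 0, 1, 'xb', (1, 0)): A returns False, B raises IndexError
import Mathlib
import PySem

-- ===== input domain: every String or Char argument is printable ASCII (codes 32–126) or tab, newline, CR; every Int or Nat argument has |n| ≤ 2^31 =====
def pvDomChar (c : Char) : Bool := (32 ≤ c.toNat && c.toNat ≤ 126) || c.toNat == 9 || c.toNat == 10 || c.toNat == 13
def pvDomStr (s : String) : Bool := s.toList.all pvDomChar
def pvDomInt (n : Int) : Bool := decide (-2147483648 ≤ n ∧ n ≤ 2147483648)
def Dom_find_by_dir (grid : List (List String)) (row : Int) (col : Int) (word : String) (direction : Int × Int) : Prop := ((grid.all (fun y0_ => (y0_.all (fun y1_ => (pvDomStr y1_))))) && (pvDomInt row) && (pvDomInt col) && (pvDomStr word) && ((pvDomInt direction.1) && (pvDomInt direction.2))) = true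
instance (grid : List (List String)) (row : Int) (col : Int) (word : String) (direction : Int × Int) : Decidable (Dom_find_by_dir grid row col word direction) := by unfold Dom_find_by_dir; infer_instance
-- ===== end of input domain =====

-- B gathers the ray's in-bounds cells via coordinate arithmetic (row+i*dr, col+i*dc) and
-- compares the collected list to the word's letters once, instead of A's inline scan with
-- curr_row/curr_col accumulators, a found flag and an early mismatch break (alternative, same cost).


-- ===== PORT A =====
-- grid[r][c]; under Pre_ both indexings are in range, the .getD defaults are never used
def pvCell (grid : List (List String)) (r c : Int) : String :=
  (PySem.List.pyGet? ((PySem.List.pyGet? grid r).getD []) c).getD ""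

-- A's for-loop over the letters of word with state (curr_row, curr_col); 'break' = stop with false
def findLoopA (grid : List (List String)) (num_rows num_cols dr dc : Int) :
    List Char → Int → Int → Bool
  | [], _, _ => true
  | letter :: rest, curr_row, curr_col =>
    if curr_row < 0 ∨ num_rows ≤ curr_row ∨ curr_col < 0 ∨ num_cols ≤ curr_col then
      false
    else if String.mk [letter] = pvCell grid curr_row curr_col then
      findLoopA grid num_rows num_cols dr dc rest (curr_row + dr) (curr_col + dc)
    else
      false

def find_by_dir (grid : List (List String)) (row : Int) (col : Int) (word : String) (direction : Int × Int) : Bool :=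
  let num_rows : Int := grid.length
  let num_cols : Int := (grid.headD []).length   -- len(grid[0]); Pre_ guarantees grid ≠ []
  findLoopA grid num_rows num_cols direction.1 direction.2 word.toList row col

-- ===== PORT B =====
-- B's gather loop: for i, letter in enumerate(word), collect grid[row+i*dr][col+i*dc] while in bounds
def gatherAlt (grid : List (List String)) (num_rows num_cols dr dc row col : Int) :
    List Char → Nat → List String
  | [], _ => []
  | _ :: rest, i =>
    let r := row + (i : Int) * dr
    let c := col + (i : Int) * dc
    if 0 ≤ r ∧ r < num_rows ∧ 0 ≤ c ∧ c < num_cols then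
      pvCell grid r c :: gatherAlt grid num_rows num_cols dr dc row col rest (i + 1)
    else
      []

def find_by_dir_alt (grid : List (List String)) (row : Int) (col : Int) (word : String) (direction : Int × Int) : Bool :=
  let num_rows : Int := grid.length
  let num_cols : Int := (grid.headD []).length   -- len(grid[0]); Pre_ guarantees grid ≠ []
  decide (gatherAlt grid num_rows num_cols direction.1 direction.2 row col word.toList 0
            = word.toList.map (fun ch => String.mk [ch]))

-- ===== PRECONDITION & SPEC =====
-- Pre_ excludes the empty grid (len(grid[0]) raises IndexError in both A and B) and ragged grids
-- where some ray cell (row+i*dr, col+i*dc) passes the num_cols = len(grid[0]) bound check but its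
-- actual row is shorter: there grid[r][c] raises IndexError in B (and in A unless an earlier
-- mismatch stopped it first, in which case A returns False but B still raises).
def Pre_find_by_dir (grid : List (List String)) (row : Int) (col : Int) (word : String) (direction : Int × Int) : Prop :=
  grid ≠ [] ∧ ∀ i ∈ List.range word.length,
    (0 ≤ row + (i : Int) * direction.1 ∧ row + (i : Int) * direction.1 < (grid.length : Int) ∧
     0 ≤ col + (i : Int) * direction.2 ∧ col + (i : Int) * direction.2 < ((grid.headD []).length : Int)) →
    col + (i : Int) * direction.2
      < (((PySem.List.pyGet? grid (row + (i : Int) * direction.1)).getD []).length : Int)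
instance (grid : List (List String)) (row : Int) (col : Int) (word : String) (direction : Int × Int) : Decidable (Pre_find_by_dir grid row col word direction) := by unfold Pre_find_by_dir; infer_instance
def pvWitness_find_by_dir : List (List String) × Int × Int × String × (Int × Int) :=
  ([["X", "M"], ["A", "S"]], 0, 0, "XM", (0, 1))

def Spec_find_by_dir (grid : List (List String)) (row : Int) (col : Int) (word : String) (direction : Int × Int) (out : Bool) : Prop := out = find_by_dir_alt grid row col word direction
instance (grid : List (List String)) (row : Int) (col : Int) (word : String) (direction : Int × Int) (out : Bool) : Decidable (Spec_find_by_dir grid row col word direction out) := by unfold Spec_find_by_dir; infer_instance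

-- ===== CLAIM (what is proved, stated in full; the proofs are below) =====
def Claim_equal_find_by_dir : Prop := ∀ (grid : List (List String)) (row : Int) (col : Int) (word : String) (direction : Int × Int), Dom_find_by_dir grid row col word direction → Pre_find_by_dir grid row col word direction → Spec_find_by_dir grid row col word direction (find_by_dir grid row col word direction)

-- ===== LEMMAS AND PROOFS =====
-- Loop invariant: A's accumulated state after i steps is exactly (row + i*dr, col + i*dc), and A's
-- remaining scan succeeds iff B's gather from index i yields exactly the remaining letters.
lemma findLoopA_eq_gather (grid : List (List String)) (nr nc dr dc row col : Int) :
    ∀ (chars : List Char) (i : Nat),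
      findLoopA grid nr nc dr dc chars (row + (i : Int) * dr) (col + (i : Int) * dc)
        = decide (gatherAlt grid nr nc dr dc row col chars i
                    = chars.map (fun ch => String.mk [ch])) := by
  intro chars
  induction chars with
  | nil => intro i; simp [findLoopA, gatherAlt]
  | cons ch rest ih =>
    intro i
    set r : Int := row + (i : Int) * dr with hr
    set c : Int := col + (i : Int) * dc with hc
    by_cases hb : 0 ≤ r ∧ r < nr ∧ 0 ≤ c ∧ c < nc
    · have hnb : ¬ (r < 0 ∨ nr ≤ r ∨ c < 0 ∨ nc ≤ c) := by omega
      rw [findLoopA, gatherAlt, if_neg hnb, if_pos hb]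
      by_cases hcell : String.mk [ch] = pvCell grid r c
      · rw [if_pos hcell]
        have hr' : r + dr = row + ((i + 1 : Nat) : Int) * dr := by push_cast; ring
        have hc' : c + dc = col + ((i + 1 : Nat) : Int) * dc := by push_cast; ring
        rw [hr', hc', ih (i + 1)]
        simp [List.map_cons]
        intro _
        exact hcell.symm
      · rw [if_neg hcell]
        simp [List.map_cons]
        intro h
        exact absurd h.symm hcell
    · have hob : r < 0 ∨ nr ≤ r ∨ c < 0 ∨ nc ≤ c := by omega
      rw [findLoopA, gatherAlt, if_pos hob, if_neg hb]
      simp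

-- ===== VERDICT (by name: the statement is the Claim_ definition above) =====
theorem find_by_dir_spec : Claim_equal_find_by_dir := by
  intro grid row col word direction _ _
  unfold Spec_find_by_dir find_by_dir find_by_dir_alt
  have h := findLoopA_eq_gather grid grid.length (grid.headD []).length
    direction.1 direction.2 row col word.toList 0
  simpa using h
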